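-- pv_equiv track=rewrite | github.com/rjamoriz/SpaceEarthQuantumOrbits | QUICK_FIX_ALL_FUNCTIONS.py | greedy_partition
-- ===== SOURCE A (Python) =====
-- def greedy_partition(conflict_matrix, sat_ids):
--     """Greedy algorithm to partition satellites into two orbit sets"""
--     n = len(sat_ids)
--     set_A = [0]  # Start with first satellite
--     set_B = []
--
--     for i in range(1, n):
--         conflict_A = sum(conflict_matrix[i][j] for j in set_A)
--         conflict_B = sum(conflict_matrix[i][j] for j in set_B) if set_B else 0
--
--         if conflict_A <= conflict_B or not set_B:
--             set_B.append(i)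
--         else:
--             set_A.append(i)
--
--     return set_A, set_B
-- ===== SOURCE B (Python) =====
-- def greedy_partition(conflict_matrix, sat_ids):
--     """Greedy partition with incremental column accumulators instead of
--     repeated row-scan sums: confA[k]/confB[k] hold the running conflict of
--     row k against the current members of set_A/set_B."""
--     n = len(sat_ids)
--     set_A = [0]
--     set_B = []
--     confA = [conflict_matrix[k][0] for k in range(n)]
--     confB = [0] * n
--     for i in range(1, n):
--         if confA[i] <= confB[i] or not set_B:
--             set_B.append(i)
--             for k in range(n):
--                 confB[k] += conflict_matrix[k][i]
--         else:
--             set_A.append(i)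
--             for k in range(n):
--                 confA[k] += conflict_matrix[k][i]
--     return set_A, set_B
-- ===== Notes on version B (the rewrite author's own statement) =====
-- stated objective: alternative
-- what changed: Replaces the per-step row-scan sums over set_A/set_B with two incremental column accumulators confA/confB (seeded with column 0, updated with column i when i is placed), so each decision is a single array read instead of an inner sum; same greedy rule and tie-breaking.
-- outside the precondition, e.g. on greedy_partition([], [5]): A returns ([0], []), B raises IndexError; on greedy_partition([[1], [2, 3]], [7, 8]): A returns ([0], [1]), B raises IndexError
import Mathlib
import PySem

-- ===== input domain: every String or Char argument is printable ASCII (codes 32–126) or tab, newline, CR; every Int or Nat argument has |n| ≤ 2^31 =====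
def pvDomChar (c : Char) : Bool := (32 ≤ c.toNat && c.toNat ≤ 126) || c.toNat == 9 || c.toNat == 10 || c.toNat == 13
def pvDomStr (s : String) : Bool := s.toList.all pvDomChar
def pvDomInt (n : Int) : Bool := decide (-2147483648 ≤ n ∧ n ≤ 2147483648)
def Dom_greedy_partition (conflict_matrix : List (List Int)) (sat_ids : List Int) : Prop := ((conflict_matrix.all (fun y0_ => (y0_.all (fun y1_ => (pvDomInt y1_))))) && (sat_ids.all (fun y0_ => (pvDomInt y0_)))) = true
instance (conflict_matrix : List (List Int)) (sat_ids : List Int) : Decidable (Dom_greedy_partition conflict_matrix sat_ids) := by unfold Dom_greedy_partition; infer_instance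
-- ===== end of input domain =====

-- B replaces A's per-step row-scan conflict sums by incremental column accumulators
-- (same greedy rule, same cost class); equivalence of return values is proved on Pre_.


-- ===== PORT A =====
-- sum(conflict_matrix[i][j] for j in set); indices stored in the sets are nonnegative
-- by construction and in range under Pre_, so getD j.toNat 0 is exact there.
def pvRowSum (row : List Int) (s : List Int) : Int :=
  s.foldl (fun acc j => acc + row.getD j.toNat 0) 0

def greedy_partition (conflict_matrix : List (List Int)) (sat_ids : List Int) : List Int × List Int :=
  let n := sat_ids.length
  (List.range' 1 (n - 1)).foldl
    (fun (st : List Int × List Int) i =>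
      let row := conflict_matrix.getD i []
      let conflictA := pvRowSum row st.1
      let conflictB := if st.2.isEmpty then 0 else pvRowSum row st.2
      if conflictA ≤ conflictB || st.2.isEmpty then
        (st.1, st.2 ++ [(i : Int)])
      else
        (st.1 ++ [(i : Int)], st.2))
    ([0], [])

-- ===== PORT B =====
-- 'for k in range(n): conf[k] += conflict_matrix[k][i]' rebuilt as a map over range n;
-- accesses are in range under Pre_, so getD 0 is exact there.
def pvColAdd (conflict_matrix : List (List Int)) (n i : Nat) (conf : List Int) : List Int :=
  (List.range n).map (fun k => conf.getD k 0 + (conflict_matrix.getD k []).getD i 0)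

def greedy_partition_alt (conflict_matrix : List (List Int)) (sat_ids : List Int) : List Int × List Int :=
  let n := sat_ids.length
  let confA0 := (List.range n).map (fun k => (conflict_matrix.getD k []).getD 0 0)
  let confB0 := List.replicate n (0 : Int)
  let r := (List.range' 1 (n - 1)).foldl
    (fun (st : List Int × List Int × List Int × List Int) i =>
      if st.2.2.1.getD i 0 ≤ st.2.2.2.getD i 0 || st.2.1.isEmpty then
        (st.1, st.2.1 ++ [(i : Int)], st.2.2.1, pvColAdd conflict_matrix n i st.2.2.2)
      else
        (st.1 ++ [(i : Int)], st.2.1, pvColAdd conflict_matrix n i st.2.2.1, st.2.2.2))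
    ([0], [], confA0, confB0)
  (r.1, r.2.1)

-- ===== PRECONDITION & SPEC =====
-- Pre_ requires a full n×n block (n = len(sat_ids)): outside it A raises IndexError on
-- most inputs but still returns on some ragged matrices whose accessed lower-left entries
-- happen to exist; B's column-wise accumulators read the whole n×n block and raise there.
def Pre_greedy_partition (conflict_matrix : List (List Int)) (sat_ids : List Int) : Prop :=
  sat_ids.length ≤ conflict_matrix.length ∧
    ∀ row ∈ conflict_matrix.take sat_ids.length, sat_ids.length ≤ row.length
instance (conflict_matrix : List (List Int)) (sat_ids : List Int) : Decidable (Pre_greedy_partition conflict_matrix sat_ids) := by unfold Pre_greedy_partition; infer_instance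

def pvWitness_greedy_partition : List (List Int) × List Int :=
  ([[0, 2, 1], [2, 0, 3], [1, 3, 0]], [10, 20, 30])

def Spec_greedy_partition (conflict_matrix : List (List Int)) (sat_ids : List Int) (out : List Int × List Int) : Prop := out = greedy_partition_alt conflict_matrix sat_ids
instance (conflict_matrix : List (List Int)) (sat_ids : List Int) (out : List Int × List Int) : Decidable (Spec_greedy_partition conflict_matrix sat_ids out) := by unfold Spec_greedy_partition; infer_instance

-- ===== CLAIM (what is proved, stated in full; the proofs are below) =====
def Claim_equal_greedy_partition : Prop := ∀ (conflict_matrix : List (List Int)) (sat_ids : List Int), Dom_greedy_partition conflict_matrix sat_ids → Pre_greedy_partition conflict_matrix sat_ids → Spec_greedy_partition conflict_matrix sat_ids (greedy_partition conflict_matrix sat_ids)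

-- ===== LEMMAS AND PROOFS =====

theorem pvRowSum_nil (row : List Int) : pvRowSum row [] = 0 := rfl

theorem pvRowSum_snoc (row : List Int) (s : List Int) (i : Nat) :
    pvRowSum row (s ++ [(i : Int)]) = pvRowSum row s + row.getD i 0 := by
  simp [pvRowSum, List.foldl_append]

theorem pvColAdd_getD (cm : List (List Int)) (n i k : Nat) (conf : List Int) (hk : k < n) :
    (pvColAdd cm n i conf).getD k 0 = conf.getD k 0 + (cm.getD k []).getD i 0 := by
  simp [pvColAdd, List.getD, hk]

-- main invariant: if confA/confB read back the row sums against the current sets,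
-- the two loop bodies keep the sets identical
theorem pv_loop_eq (cm : List (List Int)) (n : Nat) :
    ∀ (l : List Nat) (sA sB cA cB : List Int),
      (∀ i ∈ l, i < n) →
      (∀ k < n, cA.getD k 0 = pvRowSum (cm.getD k []) sA) →
      (∀ k < n, cB.getD k 0 = pvRowSum (cm.getD k []) sB) →
      ((l.foldl
        (fun (st : List Int × List Int × List Int × List Int) i =>
          if st.2.2.1.getD i 0 ≤ st.2.2.2.getD i 0 || st.2.1.isEmpty then
            (st.1, st.2.1 ++ [(i : Int)], st.2.2.1, pvColAdd cm n i st.2.2.2)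
          else
            (st.1 ++ [(i : Int)], st.2.1, pvColAdd cm n i st.2.2.1, st.2.2.2))
        (sA, sB, cA, cB)).1 =
       (l.foldl
        (fun (st : List Int × List Int) i =>
          let row := cm.getD i []
          let conflictA := pvRowSum row st.1
          let conflictB := if st.2.isEmpty then 0 else pvRowSum row st.2
          if conflictA ≤ conflictB || st.2.isEmpty then
            (st.1, st.2 ++ [(i : Int)])
          else
            (st.1 ++ [(i : Int)], st.2))
        (sA, sB)).1) ∧
      ((l.foldl
        (fun (st : List Int × List Int × List Int × List Int) i =>
          if st.2.2.1.getD i 0 ≤ st.2.2.2.getD i 0 || st.2.1.isEmpty then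
            (st.1, st.2.1 ++ [(i : Int)], st.2.2.1, pvColAdd cm n i st.2.2.2)
          else
            (st.1 ++ [(i : Int)], st.2.1, pvColAdd cm n i st.2.2.1, st.2.2.2))
        (sA, sB, cA, cB)).2.1 =
       (l.foldl
        (fun (st : List Int × List Int) i =>
          let row := cm.getD i []
          let conflictA := pvRowSum row st.1
          let conflictB := if st.2.isEmpty then 0 else pvRowSum row st.2
          if conflictA ≤ conflictB || st.2.isEmpty then
            (st.1, st.2 ++ [(i : Int)])
          else
            (st.1 ++ [(i : Int)], st.2))
        (sA, sB)).2) := by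
  intro l
  induction l with
  | nil => intro sA sB cA cB _ _ _; exact ⟨rfl, rfl⟩
  | cons i t ih =>
    intro sA sB cA cB hmem hA hB
    have hin : i < n := hmem i (by simp)
    have hAi : cA.getD i 0 = pvRowSum (cm.getD i []) sA := hA i hin
    have hBi : cB.getD i 0 = pvRowSum (cm.getD i []) sB := hB i hin
    have hcondB : (if sB.isEmpty then 0 else pvRowSum (cm.getD i []) sB)
        = pvRowSum (cm.getD i []) sB := by
      cases sB with
      | nil => simp [pvRowSum_nil]
      | cons x xs => simp
    simp only [List.foldl_cons]
    by_cases hc : pvRowSum (cm.getD i []) sA ≤ pvRowSum (cm.getD i []) sB ∨ sB.isEmpty = true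
    · have hcb : (cA.getD i 0 ≤ cB.getD i 0 || sB.isEmpty) = true := by
        rw [hAi, hBi]; simpa [decide_eq_true_iff] using hc
      have hca : ((pvRowSum (cm.getD i []) sA ≤ (if sB.isEmpty then 0 else pvRowSum (cm.getD i []) sB)) || sB.isEmpty) = true := by
        rw [hcondB]; simpa [decide_eq_true_iff] using hc
      simp only [hcb, hca, if_true]
      exact ih sA (sB ++ [(i : Int)]) cA (pvColAdd cm n i cB)
        (fun j hj => hmem j (by simp [hj]))
        hA
        (fun k hk => by
          rw [pvColAdd_getD cm n i k cB hk, hB k hk, pvRowSum_snoc])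
    · have hcb : (cA.getD i 0 ≤ cB.getD i 0 || sB.isEmpty) = false := by
        rw [hAi, hBi]
        simpa [decide_eq_true_iff] using hc
      have hca : ((pvRowSum (cm.getD i []) sA ≤ (if sB.isEmpty then 0 else pvRowSum (cm.getD i []) sB)) || sB.isEmpty) = false := by
        rw [hcondB]
        simpa [decide_eq_true_iff] using hc
      simp only [hcb, hca, if_false, Bool.false_eq_true]
      exact ih (sA ++ [(i : Int)]) sB (pvColAdd cm n i cA) cB
        (fun j hj => hmem j (by simp [hj]))
        (fun k hk => by
          rw [pvColAdd_getD cm n i k cA hk, hA k hk, pvRowSum_snoc])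
        hB

-- ===== VERDICT (by name: the statement is the Claim_ definition above) =====
theorem greedy_partition_spec : Claim_equal_greedy_partition := by
  intro cm sat_ids _ _
  unfold Spec_greedy_partition greedy_partition greedy_partition_alt
  simp only []
  have h := pv_loop_eq cm sat_ids.length (List.range' 1 (sat_ids.length - 1))
    [0] []
    ((List.range sat_ids.length).map (fun k => (cm.getD k []).getD 0 0))
    (List.replicate sat_ids.length (0 : Int))
    (by intro i hi
        have := List.mem_range'_1.mp hi
        omega)
    (by intro k hk
        simp [List.getD, hk, pvRowSum])
    (by intro k hk
        simp [List.getD, hk, pvRowSum_nil])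
  exact Prod.ext h.1.symm h.2.symm
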